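-- pv_equiv track=rewrite | github.com/TimeATronics/AISearch_Assignment | src/search_algorithms.py | dfs
-- ===== SOURCE A (Python) =====
-- DIRECTIONS = [(-1, 0), (1, 0), (0, -1), (0, 1)]
--
-- def dfs(start, goal, obstacles, rows, cols):
--     stack = [(start, [])]
--     visited = set([start])
--     while stack:
--         current, path = stack.pop()
--         if current == goal:
--             return path
--         for direction in DIRECTIONS:
--             new_pos = (current[0] + direction[0], current[1] + direction[1])
--             if (0 <= new_pos[0] < rows and 0 <= new_pos[1] < cols and
--                 new_pos not in obstacles and new_pos not in visited):
--                 visited.add(new_pos)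
--                 stack.append((new_pos, path + [direction]))
--     return []
-- ===== SOURCE B (Python) =====
-- DIRECTIONS = [(-1, 0), (1, 0), (0, -1), (0, 1)]
--
-- def dfs(start, goal, obstacles, rows, cols):
--     # Parent/direction map instead of a copied path per stack entry: fresh
--     # neighbours are collected in one filtering pass (the four neighbours of a
--     # cell are distinct, so filtering against the pre-step map is exact), and
--     # the direction sequence is rebuilt only once, at the goal.
--     def rebuild(node):
--         path = []
--         while parent[node] is not None:
--             node, d = parent[node]
--             path.append(d)
--         return path[::-1]
--
--     parent = {start: None}
--     stack = [start]
--     while stack: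
--         current = stack.pop()
--         if current == goal:
--             return rebuild(current)
--         fresh = [d for d in DIRECTIONS
--                  if 0 <= current[0] + d[0] < rows
--                  and 0 <= current[1] + d[1] < cols
--                  and (current[0] + d[0], current[1] + d[1]) not in obstacles
--                  and (current[0] + d[0], current[1] + d[1]) not in parent]
--         for d in fresh:
--             parent[(current[0] + d[0], current[1] + d[1])] = (current, d)
--         stack.extend((current[0] + d[0], current[1] + d[1]) for d in fresh)
--     return []
-- ===== Notes on version B (the rewrite author's own statement) =====
-- stated objective: alternative
-- what changed: B records a parent/direction map and collects each cell's fresh neighbours in one batch filtering pass, rebuilding the path recursively once at the goal instead of copying the whole path list on every stack push as A does.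
import Mathlib
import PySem

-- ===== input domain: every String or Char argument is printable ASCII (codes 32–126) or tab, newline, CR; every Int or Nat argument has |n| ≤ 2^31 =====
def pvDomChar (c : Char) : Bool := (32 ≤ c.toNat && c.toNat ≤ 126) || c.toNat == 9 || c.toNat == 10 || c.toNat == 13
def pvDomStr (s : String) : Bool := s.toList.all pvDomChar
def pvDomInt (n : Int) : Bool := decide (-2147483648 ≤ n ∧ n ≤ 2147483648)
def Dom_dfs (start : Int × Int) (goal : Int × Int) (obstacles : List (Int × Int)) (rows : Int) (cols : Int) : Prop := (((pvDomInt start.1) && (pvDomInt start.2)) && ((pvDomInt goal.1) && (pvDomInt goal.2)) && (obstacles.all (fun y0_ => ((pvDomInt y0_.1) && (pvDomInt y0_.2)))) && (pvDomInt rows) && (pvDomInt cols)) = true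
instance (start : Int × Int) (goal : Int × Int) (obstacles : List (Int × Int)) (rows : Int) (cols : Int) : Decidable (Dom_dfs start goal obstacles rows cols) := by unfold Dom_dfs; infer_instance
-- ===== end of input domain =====

-- B replaces A's per-push path copying (path + [direction]) by a parent/direction map, batch
-- neighbour filtering and a single recursive path reconstruction at the goal; same returned path.

-- ===== PORT A =====
-- DIRECTIONS (module constant), shared verbatim by both Pythons
def pvDirs : List (Int × Int) := [(-1, 0), (1, 0), (0, -1), (0, 1)]

-- A's in-grid / not-an-obstacle test
def pvOpen (obstacles : List (Int × Int)) (rows cols : Int) (np : Int × Int) : Bool :=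
  decide (0 ≤ np.1) && decide (np.1 < rows) && decide (0 ≤ np.2) && decide (np.2 < cols) &&
    !(obstacles.contains np)

-- the 'for direction in DIRECTIONS' body of A; stack top is the list HEAD (Python pushes/pops at
-- the end; consing in DIRECTIONS order yields exactly Python's pop order)
def dfsA_push (obstacles : List (Int × Int)) (rows cols : Int) (current : Int × Int)
    (path : List (Int × Int))
    (sv : List ((Int × Int) × List (Int × Int)) × PySem.Set (Int × Int)) :
    List ((Int × Int) × List (Int × Int)) × PySem.Set (Int × Int) :=
  pvDirs.foldl (fun sv d =>
    let np := (current.1 + d.1, current.2 + d.2)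
    if pvOpen obstacles rows cols np && !(PySem.Set.contains sv.2 np) then
      ((np, path ++ [d]) :: sv.1, PySem.Set.add sv.2 np)
    else sv) sv

-- the 'while stack' loop; fuel is a totality guard only: each iteration pops one entry and at most
-- rows*cols + 1 entries are ever pushed (each pushed node is a distinct in-grid cell, plus start)
def dfsA_loop (goal : Int × Int) (obstacles : List (Int × Int)) (rows cols : Int) :
    Nat → List ((Int × Int) × List (Int × Int)) → PySem.Set (Int × Int) → List (Int × Int)
  | 0, _, _ => []
  | _ + 1, [], _ => []
  | f + 1, (current, path) :: rest, visited =>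
    if current = goal then path
    else
      let sv := dfsA_push obstacles rows cols current path (rest, visited)
      dfsA_loop goal obstacles rows cols f sv.1 sv.2

def dfs (start : Int × Int) (goal : Int × Int) (obstacles : List (Int × Int)) (rows : Int) (cols : Int) : List (Int × Int) :=
  dfsA_loop goal obstacles rows cols (rows.toNat * cols.toNat + 2)
    [(start, [])] (PySem.Set.ofList [start])

-- ===== PORT B =====
-- the parent/direction map type of B
abbrev PvPar := PySem.Dict (Int × Int) (Option ((Int × Int) × (Int × Int)))

-- (current[0] + d[0], current[1] + d[1])
def npB (current d : Int × Int) : Int × Int := (current.1 + d.1, current.2 + d.2)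

-- the 'fresh = [d for d in DIRECTIONS if …]' comprehension of B (one filtering pass)
def pvFreshB (obstacles : List (Int × Int)) (rows cols : Int) (parent : PvPar)
    (current : Int × Int) : List (Int × Int) :=
  pvDirs.filter (fun d =>
    decide (0 ≤ (npB current d).1 ∧ (npB current d).1 < rows ∧
            0 ≤ (npB current d).2 ∧ (npB current d).2 < cols ∧
            (npB current d) ∉ obstacles)
      && !(parent.contains (npB current d)))

-- B's 'rebuild' loop followed by the final [::-1]; every looked-up node is a key of parent, so
-- getD's default is never taken; fuel is a totality guard (the parent chain is shorter than the map)
def dfsB_recon (parent : PvPar) : Nat → (Int × Int) → List (Int × Int) → List (Int × Int)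
  | 0, _, path => path.reverse
  | f + 1, node, path =>
    match parent.getD node none with
    | none => path.reverse
    | some (prev, d) => dfsB_recon parent f prev (path ++ [d])

-- the 'while stack' loop of B: pop, rebuild at the goal, otherwise batch-insert the fresh
-- neighbours into parent and extend the stack (head = top, so extend = reversed fresh in front)
def dfsB_loop (goal : Int × Int) (obstacles : List (Int × Int)) (rows cols : Int) :
    Nat → List (Int × Int) → PvPar → List (Int × Int)
  | 0, _, _ => []
  | _ + 1, [], _ => []
  | f + 1, current :: rest, parent =>
    if current = goal then dfsB_recon parent (parent.size + 1) current []
    else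
      let fresh := pvFreshB obstacles rows cols parent current
      dfsB_loop goal obstacles rows cols f
        ((fresh.map (npB current)).reverse ++ rest)
        (fresh.foldl (fun p d => p.insert (npB current d) (some (current, d))) parent)

def dfs_alt (start : Int × Int) (goal : Int × Int) (obstacles : List (Int × Int)) (rows : Int) (cols : Int) : List (Int × Int) :=
  dfsB_loop goal obstacles rows cols (rows.toNat * cols.toNat + 2)
    [start] (PySem.Dict.empty.insert start none)

-- ===== PRECONDITION & SPEC =====
def Spec_dfs (start : Int × Int) (goal : Int × Int) (obstacles : List (Int × Int)) (rows : Int) (cols : Int) (out : List (Int × Int)) : Prop := out = dfs_alt start goal obstacles rows cols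
instance (start : Int × Int) (goal : Int × Int) (obstacles : List (Int × Int)) (rows : Int) (cols : Int) (out : List (Int × Int)) : Decidable (Spec_dfs start goal obstacles rows cols out) := by unfold Spec_dfs; infer_instance

-- ===== CLAIM =====
def Claim_equal_dfs : Prop := ∀ (start : Int × Int) (goal : Int × Int) (obstacles : List (Int × Int)) (rows : Int) (cols : Int), Dom_dfs start goal obstacles rows cols → Spec_dfs start goal obstacles rows cols (dfs start goal obstacles rows cols)

-- ===== LEMMAS AND PROOFS =====

-- 'PathOf parent node p': following parent from node back to the root reads off exactly the
-- direction list p (in path order; p is what A stores with the stack entry for node)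
inductive PathOf (parent : PvPar) : (Int × Int) → List (Int × Int) → Prop
  | nil (node : Int × Int) : parent.get? node = some none → PathOf parent node []
  | cons (node prev d : Int × Int) (p : List (Int × Int)) :
      parent.get? node = some (some (prev, d)) → PathOf parent prev p →
      PathOf parent node (p ++ [d])

-- a map extension that preserves every existing binding preserves every chain
theorem pathOf_mono (P P' : PvPar) (h : ∀ k v, P.get? k = some v → P'.get? k = some v) :
    ∀ (node : Int × Int) (p : List (Int × Int)), PathOf P node p → PathOf P' node p := by
  intro node p hp
  induction hp with
  | nil n hg => exact PathOf.nil n (h _ _ hg)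
  | cons n prev d p hg _ ih => exact PathOf.cons n prev d p (h _ _ hg) ih

-- B's rebuild loop reads back exactly the stored path
theorem recon_eq (parent : PvPar) (node : Int × Int) (p : List (Int × Int))
    (h : PathOf parent node p) :
    ∀ (fuel : Nat), p.length < fuel → ∀ (acc : List (Int × Int)),
      dfsB_recon parent fuel node acc = (acc ++ p.reverse).reverse := by
  induction h with
  | nil n hg =>
    intro fuel hf acc
    cases fuel with
    | zero => omega
    | succ f => simp [dfsB_recon, PySem.Dict.getD_eq_get?_getD, hg]
  | cons n prev d p hg _ ih =>
    intro fuel hf acc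
    cases fuel with
    | zero => simp at hf
    | succ f =>
      simp only [dfsB_recon, PySem.Dict.getD_eq_get?_getD, hg, Option.getD_some]
      rw [ih f (by simp at hf ⊢; omega) (acc ++ [d])]
      simp

theorem npB_fold (current d : Int × Int) :
    ((current.1 + d.1, current.2 + d.2) : Int × Int) = npB current d := rfl

theorem contains_add_of_ne (vis : PySem.Set (Int × Int)) (x y : Int × Int) (h : y ≠ x) :
    PySem.Set.contains (PySem.Set.add vis x) y = PySem.Set.contains vis y := by
  by_cases hm : x ∈ vis
  · rw [PySem.Set.add_of_mem hm]
  · rw [PySem.Set.add_of_not_mem hm]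
    simp [PySem.Set.contains_eq_listContains, h]

-- A's per-direction foldl, characterised as B's one-pass filter followed by batch updates
theorem foldA_char (obstacles : List (Int × Int)) (rows cols : Int) (current : Int × Int)
    (path : List (Int × Int)) :
    ∀ (ds : List (Int × Int)) (stA : List ((Int × Int) × List (Int × Int)))
      (vis : PySem.Set (Int × Int)), (ds.map (npB current)).Nodup →
      ds.foldl (fun sv d =>
          let np := (current.1 + d.1, current.2 + d.2)
          if pvOpen obstacles rows cols np && !(PySem.Set.contains sv.2 np) then
            ((np, path ++ [d]) :: sv.1, PySem.Set.add sv.2 np)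
          else sv) (stA, vis) =
        (((ds.filter (fun d => pvOpen obstacles rows cols (npB current d) &&
              !(PySem.Set.contains vis (npB current d)))).map
            (fun d => (npB current d, path ++ [d]))).reverse ++ stA,
         (ds.filter (fun d => pvOpen obstacles rows cols (npB current d) &&
              !(PySem.Set.contains vis (npB current d)))).foldl
            (fun v d => PySem.Set.add v (npB current d)) vis) := by
  intro ds
  induction ds with
  | nil => intro stA vis _; simp
  | cons d ds ih =>
    intro stA vis hnd
    simp only [List.map_cons, List.nodup_cons, List.mem_map] at hnd
    obtain ⟨hhead, htail⟩ := hnd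
    have hcongr : ∀ d' ∈ ds,
        (pvOpen obstacles rows cols (npB current d') &&
          !(PySem.Set.contains (PySem.Set.add vis (npB current d)) (npB current d'))) =
        (pvOpen obstacles rows cols (npB current d') &&
          !(PySem.Set.contains vis (npB current d'))) := by
      intro d' hd'
      rw [contains_add_of_ne]
      intro he
      exact hhead ⟨d', hd', he⟩
    simp only [List.foldl_cons, List.filter_cons, npB_fold]
    by_cases hp : (pvOpen obstacles rows cols (npB current d) &&
        !(PySem.Set.contains vis (npB current d))) = true
    · simp only [hp, if_pos]
      have ih' := ih ((npB current d, path ++ [d]) :: stA) (PySem.Set.add vis (npB current d)) htail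
      simp only [npB_fold] at ih'
      rw [ih', List.filter_congr hcongr]
      simp [List.append_assoc]
    · simp only [hp, if_neg, Bool.false_eq_true, not_false_eq_true]
      have ih' := ih stA vis htail
      simp only [npB_fold] at ih'
      exact ih'

-- batch insertion of fresh, distinct keys: old bindings survive, keys/size/new bindings as stated
theorem grow_props (current : Int × Int) :
    ∀ (L : List (Int × Int)) (parent : PvPar),
      (L.map (npB current)).Nodup →
      (∀ d ∈ L, parent.contains (npB current d) = false) →
      (∀ k v, parent.get? k = some v →
        (L.foldl (fun p d => p.insert (npB current d) (some (current, d))) parent).get? k = some v)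
      ∧ (L.foldl (fun p d => p.insert (npB current d) (some (current, d))) parent).keys =
          L.foldl (fun v d => PySem.Set.add v (npB current d)) parent.keys
      ∧ (L.foldl (fun p d => p.insert (npB current d) (some (current, d))) parent).size =
          parent.size + L.length
      ∧ (∀ d ∈ L,
        (L.foldl (fun p d => p.insert (npB current d) (some (current, d))) parent).get?
          (npB current d) = some (some (current, d))) := by
  intro L
  induction L with
  | nil => intro parent _ _; exact ⟨fun k v h => h, rfl, by simp, by simp⟩
  | cons d L ih =>
    intro parent hnd hfr
    simp only [List.map_cons, List.nodup_cons, List.mem_map] at hnd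
    obtain ⟨hhead, htail⟩ := hnd
    have hf0 : parent.contains (npB current d) = false := hfr d (List.mem_cons_self ..)
    have hfr1 : ∀ d' ∈ L,
        (parent.insert (npB current d) (some (current, d))).contains (npB current d') = false := by
      intro d' hd'
      rw [PySem.Dict.contains_insert]
      have hne : (npB current d' == npB current d) = false := by
        simp only [beq_eq_false_iff_ne, ne_eq]
        intro he; exact hhead ⟨d', hd', he⟩
      rw [hne, hfr d' (List.mem_cons_of_mem _ hd')]
      rfl
    obtain ⟨ih1, ih2, ih3, ih4⟩ := ih (parent.insert (npB current d) (some (current, d))) htail hfr1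
    simp only [List.foldl_cons]
    refine ⟨?_, ?_, ?_, ?_⟩
    · intro k v hk
      refine ih1 k v ?_
      rw [PySem.Dict.get?_insert_of_ne]
      · exact hk
      · intro he; subst he
        rw [(PySem.Dict.get?_eq_none_iff_contains parent _).2 hf0] at hk; cases hk
    · rw [ih2, PySem.Dict.keys_insert_of_not_contains _ _ hf0,
          PySem.Set.add_of_not_mem (by
            rw [PySem.Dict.contains_eq_decide_mem_keys] at hf0
            simpa using hf0)]
    · rw [ih3, PySem.Dict.size_insert]
      simp [hf0, Nat.add_assoc, Nat.add_comm 1]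
    · intro d' hd'
      rcases List.mem_cons.mp hd' with he | he
      · subst he
        exact ih1 _ _ (PySem.Dict.get?_insert_self ..)
      · exact ih4 d' he

-- A's neighbour test over visited equals B's comprehension test over parent (vis = parent.keys)
theorem pred_eq (obstacles : List (Int × Int)) (rows cols : Int) (parent : PvPar)
    (current d : Int × Int) :
    (pvOpen obstacles rows cols (npB current d) &&
      !(PySem.Set.contains parent.keys (npB current d))) =
    (decide (0 ≤ (npB current d).1 ∧ (npB current d).1 < rows ∧
            0 ≤ (npB current d).2 ∧ (npB current d).2 < cols ∧
            (npB current d) ∉ obstacles)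
      && !(parent.contains (npB current d))) := by
  rw [PySem.Dict.contains_eq_decide_mem_keys]
  simp [pvOpen, PySem.Set.contains_eq_listContains, Bool.and_assoc]

-- the two while-loops agree step for step
theorem loop_sim (goal : Int × Int) (obstacles : List (Int × Int)) (rows cols : Int) :
    ∀ (fuel : Nat) (stA : List ((Int × Int) × List (Int × Int))) (vis : PySem.Set (Int × Int))
      (stB : List (Int × Int)) (parent : PvPar),
      stB = stA.map Prod.fst → vis = parent.keys →
      (∀ e ∈ stA, PathOf parent e.1 e.2 ∧ e.2.length < parent.size) →
      dfsA_loop goal obstacles rows cols fuel stA vis =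
        dfsB_loop goal obstacles rows cols fuel stB parent := by
  intro fuel
  induction fuel with
  | zero => intro stA vis stB parent _ _ _; rfl
  | succ f ih =>
    intro stA vis stB parent h1 h2 h3
    cases stA with
    | nil => subst h1; rfl
    | cons e rest =>
      obtain ⟨current, path⟩ := e
      subst h1
      rcases h3 (current, path) (List.mem_cons_self ..) with ⟨hp, hl⟩
      simp only [dfsA_loop, dfsB_loop, List.map_cons]
      by_cases hg : current = goal
      · simp only [hg, if_pos]
        rw [recon_eq parent goal path (hg ▸ hp) (parent.size + 1) (Nat.lt_succ_of_lt hl) []]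
        simp
      · simp only [if_neg hg]
        have hdirsnd : (pvDirs.map (npB current)).Nodup := by
          simp [pvDirs, npB, Prod.ext_iff]
        rw [dfsA_push, foldA_char obstacles rows cols current path pvDirs rest vis hdirsnd]
        have hLA : pvDirs.filter (fun d => pvOpen obstacles rows cols (npB current d) &&
            !(PySem.Set.contains vis (npB current d))) =
            pvFreshB obstacles rows cols parent current := by
          rw [pvFreshB]
          refine List.filter_congr ?_
          intro d _
          rw [h2, pred_eq]
        rw [hLA]
        have hfreshnd : ((pvFreshB obstacles rows cols parent current).map (npB current)).Nodup :=
          (List.filter_sublist.map (npB current)).nodup hdirsnd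
        have hfreshfr : ∀ d ∈ pvFreshB obstacles rows cols parent current,
            parent.contains (npB current d) = false := by
          intro d hd
          rcases List.mem_filter.mp hd with ⟨_, hpred⟩
          rcases Bool.and_eq_true .. |>.mp hpred with ⟨_, hn⟩
          simpa using hn
        obtain ⟨g1, g2, g3, g4⟩ := grow_props current _ parent hfreshnd hfreshfr
        refine ih _ _ _ _ ?_ ?_ ?_
        · simp [Function.comp]
        · rw [h2, ← g2]
        · intro e he
          rcases List.mem_append.mp he with he | he
          · rw [List.mem_reverse] at he
            rcases List.mem_map.mp he with ⟨d, hd, rfl⟩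
            refine ⟨PathOf.cons _ current d path (g4 d hd) (pathOf_mono _ _ g1 _ _ hp), ?_⟩
            have hpos : 0 < (pvFreshB obstacles rows cols parent current).length :=
              List.length_pos_of_mem hd
            have hlen : ((path ++ [d]).length) = path.length + 1 := by simp
            rw [g3, hlen]
            simp only at hl
            omega
          · rcases h3 e (List.mem_cons_of_mem _ he) with ⟨hpe, hle⟩
            refine ⟨pathOf_mono _ _ g1 _ _ hpe, ?_⟩
            rw [g3]; omega

-- ===== VERDICT (by name: the statement is the Claim_ definition above) =====
theorem dfs_spec : Claim_equal_dfs := by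
  intro start goal obstacles rows cols _
  unfold Spec_dfs dfs dfs_alt
  refine loop_sim goal obstacles rows cols _ _ _ _ _ rfl ?_ ?_
  · rw [PySem.Dict.keys_insert_of_not_contains _ _ (by simp)]
    simp [PySem.Set.ofList, PySem.Dict.keys_empty, PySem.Set.add]
  · intro e he
    rcases List.mem_singleton.mp he with rfl
    refine ⟨PathOf.nil _ (PySem.Dict.get?_insert_self ..), ?_⟩
    rw [PySem.Dict.size_insert]
    simp
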